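-- pv_equiv track=rewrite | github.com/boris-kz/CogAlg | frame_2D_alg/comp_gradient.py | lateral_comp
-- ===== SOURCE A (Python) =====
-- def lateral_comp(P_):  # horizontal comparison
--
--     derts__ = []
--
--     for P in P_:
--         x0 = P[1]
--         derts_ = P[-1]
--         new_derts_ = []
--
--         _derts = derts_[0]
--         _g = _derts[-1][0]          # take g from indicated dert
--         _dx, _ncomp = 0, 0          # init ncomp, dx buffers
--
--         for derts in derts_[1:]:
--             # compute angle:
--             g = derts[-1][0]    # take g from indicated dert
--
--             d = g - _g          # lateral comparison
--
--             dx = d              # dx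
--             _dx += d            # bilateral accumulation
--             _ncomp += 1         # bilateral accumulation
--
--             new_derts_.append(_derts + [(0, _dx, _ncomp)])     # make new derts with addition dert, append it to new_derts_
--
--             _derts = derts                  # buffer last derts
--             _g, _dx, _ncomp = g, dx, 1      # buffer last ncomp and dx
--
--             new_derts_.append(_derts + [(0, _dx, _ncomp)])     # return last one
--
--         derts__.append((x0, new_derts_))    # new line of P derts_ appended with new_derts_
--
--     return derts__
-- ===== SOURCE B (Python) =====
-- def lateral_comp(P_):  # horizontal comparison via precomputed difference lists zipped positionally
--     derts__ = []
--     for P in P_: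
--         derts_ = P[-1]
--         g_ = [derts[-1][0] for derts in derts_]
--         diff_ = [b - a for a, b in zip(g_, g_[1:])]
--         pdiff_ = [0] + diff_[:-1]               # diff accumulated from the left (0 for the first pair)
--         ncomp_ = [1] + [2] * (len(diff_) - 1)   # first pair compared once, the rest twice
--         new_derts_ = []
--         for left, right, pd, d, n in zip(derts_, derts_[1:], pdiff_, diff_, ncomp_):
--             new_derts_ += [left + [(0, pd + d, n)], right + [(0, d, 1)]]
--         derts__.append((P[1], new_derts_))
--     return derts__
-- ===== Notes on version B (the rewrite author's own statement) =====
-- stated objective: alternative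
-- what changed: Replaces A's stateful stream (running _derts/_g/_dx/_ncomp buffers mutated through one loop) by a positional decomposition: precompute the g list and adjacent-difference list, derive the left-accumulated diffs and ncomp lists, and zip the five streams to emit both derts per pair.
import Mathlib
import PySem

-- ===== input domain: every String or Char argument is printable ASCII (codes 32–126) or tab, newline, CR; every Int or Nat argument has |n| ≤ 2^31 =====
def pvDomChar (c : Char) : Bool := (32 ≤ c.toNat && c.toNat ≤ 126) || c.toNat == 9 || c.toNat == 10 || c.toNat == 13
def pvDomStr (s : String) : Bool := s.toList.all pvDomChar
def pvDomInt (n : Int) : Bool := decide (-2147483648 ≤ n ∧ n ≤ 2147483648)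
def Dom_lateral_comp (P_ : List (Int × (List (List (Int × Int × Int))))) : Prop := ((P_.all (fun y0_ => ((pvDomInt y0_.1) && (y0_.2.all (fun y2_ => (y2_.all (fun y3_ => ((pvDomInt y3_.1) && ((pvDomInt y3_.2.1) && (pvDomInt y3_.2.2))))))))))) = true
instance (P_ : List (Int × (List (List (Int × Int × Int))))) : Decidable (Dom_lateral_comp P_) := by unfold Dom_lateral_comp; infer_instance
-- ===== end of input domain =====

-- B replaces A's running-buffer stream by precomputed difference/ncomp lists zipped positionally; equal value on Pre_ (A raises where Pre_ fails).

-- ===== PORT A =====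
-- derts[-1][0] (raises on empty derts; Pre_ excludes that, default here is unreachable on Pre_)
def pvLastG (derts : List (Int × Int × Int)) : Int :=
  ((PySem.List.pyGet? derts (-1)).getD (0, 0, 0)).1

-- one iteration of A's inner loop: state = (_derts, _g, _dx, _ncomp, new_derts_)
def pvStepA (s : List (Int × Int × Int) × Int × Int × Int × List (List (Int × Int × Int)))
    (derts : List (Int × Int × Int)) :
    List (Int × Int × Int) × Int × Int × Int × List (List (Int × Int × Int)) :=
  let g := pvLastG derts
  let d := g - s.2.1
  let dx := d
  let ndx := s.2.2.1 + d
  let nn := s.2.2.2.1 + 1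
  let new1 := s.2.2.2.2 ++ [s.1 ++ [(0, ndx, nn)]]
  let new2 := new1 ++ [derts ++ [(0, dx, 1)]]
  (derts, g, dx, 1, new2)

def lateral_comp (P_ : List (Int × (List (List (Int × Int × Int))))) : List ((List (List (Int × Int × Int))) × (List (List (Int × Int × Int)))) :=
  P_.foldl (fun derts__ P =>
    let x0 := P.2                      -- P[1] of the 2-tuple (x0, derts_) is derts_
    let derts_ := P.2                  -- P[-1]
    let _derts := (PySem.List.pyGet? derts_ 0).getD []
    let _g := pvLastG _derts
    let st := (PySem.List.slice derts_ (some 1) none).foldl pvStepA (_derts, _g, 0, 0, [])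
    derts__ ++ [(x0, st.2.2.2.2)]) []

-- ===== PORT B =====
-- B's derts[-1][0]
def pvG (derts : List (Int × Int × Int)) : Int :=
  ((PySem.List.pyGet? derts (-1)).getD (0, 0, 0)).1

def lateral_comp_alt (P_ : List (Int × (List (List (Int × Int × Int))))) : List ((List (List (Int × Int × Int))) × (List (List (Int × Int × Int)))) :=
  P_.foldl (fun derts__ P =>
    let derts_ := P.2
    let g_ := derts_.map pvG
    let diff_ := (g_.zip (PySem.List.slice g_ (some 1) none)).map (fun p => p.2 - p.1)
    let pdiff_ := (0 : Int) :: diff_.dropLast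
    let ncomp_ := (1 : Int) :: List.replicate (diff_.length - 1) 2
    let new_derts_ :=
      (derts_.zip ((PySem.List.slice derts_ (some 1) none).zip (pdiff_.zip (diff_.zip ncomp_)))).foldl
        (fun acc q => acc ++ [q.1 ++ [(0, q.2.2.1 + q.2.2.2.1, q.2.2.2.2)],
                              q.2.1 ++ [(0, q.2.2.2.1, 1)]]) []
    derts__ ++ [(P.2, new_derts_)]) []

-- ===== PRECONDITION & SPEC =====
-- Pre_ excludes exactly the inputs where Python A raises IndexError: some P has an empty derts_ list, or some derts element is empty (derts_[0] / derts[-1]).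
def Pre_lateral_comp (P_ : List (Int × (List (List (Int × Int × Int))))) : Prop :=
  ∀ P ∈ P_, P.2 ≠ [] ∧ ∀ d ∈ P.2, d ≠ []
instance (P_ : List (Int × (List (List (Int × Int × Int))))) : Decidable (Pre_lateral_comp P_) := by unfold Pre_lateral_comp; infer_instance
def pvWitness_lateral_comp : (List (Int × (List (List (Int × Int × Int))))) :=
  [(0, [[(3, 0, 0)], [(5, 1, 2)], [(2, 0, 1)]])]
def Spec_lateral_comp (P_ : List (Int × (List (List (Int × Int × Int))))) (out : List ((List (List (Int × Int × Int))) × (List (List (Int × Int × Int))))) : Prop := out = lateral_comp_alt P_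
instance (P_ : List (Int × (List (List (Int × Int × Int))))) (out : List ((List (List (Int × Int × Int))) × (List (List (Int × Int × Int))))) : Decidable (Spec_lateral_comp P_ out) := by unfold Spec_lateral_comp; infer_instance

-- ===== CLAIM (what is proved, stated in full; the proofs are below) =====
def Claim_equal_lateral_comp : Prop := ∀ (P_ : List (Int × (List (List (Int × Int × Int))))), Dom_lateral_comp P_ → Pre_lateral_comp P_ → Spec_lateral_comp P_ (lateral_comp P_)

-- ===== LEMMAS AND PROOFS =====

-- common recursive description of the per-P output stream: emit (prev + pending dx, n) and (d + fresh diff, 1) per pair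
def pvGo (prev : List (Int × Int × Int)) (pg pdx n : Int) :
    List (List (Int × Int × Int)) → List (List (Int × Int × Int))
  | [] => []
  | d :: t =>
    (prev ++ [(0, pdx + (pvG d - pg), n)]) ::
    (d ++ [(0, pvG d - pg, 1)]) ::
    pvGo d (pvG d) (pvG d - pg) 2 t

theorem pvA_loop (t : List (List (Int × Int × Int)))
    (prev : List (Int × Int × Int)) (pg pdx pn : Int) (acc : List (List (Int × Int × Int))) :
    (t.foldl pvStepA (prev, pg, pdx, pn, acc)).2.2.2.2 = acc ++ pvGo prev pg pdx (pn + 1) t := by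
  induction t generalizing prev pg pdx pn acc with
  | nil => simp [pvGo]
  | cons d t ih =>
    simp only [List.foldl_cons, pvStepA, pvGo, ih, pvLastG, pvG]
    simp

theorem pvB_loop (ds : List (List (Int × Int × Int)))
    (prev : List (Int × Int × Int)) (pd n : Int) :
    (let g_ := (prev :: ds).map pvG
     let diff_ := (g_.zip (g_.drop 1)).map (fun p => p.2 - p.1)
     ((prev :: ds).zip (ds.zip ((pd :: diff_.dropLast).zip
        (diff_.zip (n :: List.replicate (diff_.length - 1) 2))))).flatMap
       (fun q => [q.1 ++ [(0, q.2.2.1 + q.2.2.2.1, q.2.2.2.2)],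
                  q.2.1 ++ [(0, q.2.2.2.1, 1)]]))
      = pvGo prev (pvG prev) pd n ds := by
  induction ds generalizing prev pd n with
  | nil => simp [pvGo]
  | cons d t ih =>
    cases t with
    | nil => simp [pvGo]
    | cons d2 t2 =>
      have h := ih d (pvG d - pvG prev) 2
      simp only [List.map_cons, List.drop_succ_cons, List.drop_zero, List.zip_cons_cons,
        List.length_cons, List.dropLast, List.flatMap_cons, List.map] at h ⊢
      simp only [Nat.add_sub_cancel, List.replicate_succ] at h ⊢
      rw [pvGo]
      simp only [List.cons_append, List.nil_append]
      exact congrArg _ (congrArg _ h)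

theorem pv_inner (derts_ : List (List (Int × Int × Int))) :
    (let _derts := (PySem.List.pyGet? derts_ 0).getD []
     ((PySem.List.slice derts_ (some 1) none).foldl pvStepA
        (_derts, pvLastG _derts, 0, 0, [])).2.2.2.2)
    =
    (let g_ := derts_.map pvG
     let diff_ := (g_.zip (PySem.List.slice g_ (some 1) none)).map (fun p => p.2 - p.1)
     (derts_.zip ((PySem.List.slice derts_ (some 1) none).zip (((0 : Int) :: diff_.dropLast).zip
        (diff_.zip ((1 : Int) :: List.replicate (diff_.length - 1) 2))))).foldl
       (fun acc q => acc ++ [q.1 ++ [(0, q.2.2.1 + q.2.2.2.1, q.2.2.2.2)],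
                             q.2.1 ++ [(0, q.2.2.2.1, 1)]]) []) := by
  simp only [PySem.List.slice_from_one]
  rw [PySem.List.foldl_append_eq_flatMap]
  cases derts_ with
  | nil => simp
  | cons d0 ds =>
    have hget : (PySem.List.pyGet? (d0 :: ds) 0).getD [] = d0 := by
      simp [PySem.List.pyGet?, PySem.List.pyIdx?]
    rw [pvA_loop]
    simp only [hget, List.nil_append, List.tail_cons]
    have h := pvB_loop ds d0 0 1
    simp only [List.drop_one] at h
    rw [show ((0:Int) + 1) = 1 from rfl, show pvLastG d0 = pvG d0 from rfl, ← h]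

theorem lateral_comp_spec : Claim_equal_lateral_comp := by
  intro P_ _ _
  unfold Spec_lateral_comp lateral_comp lateral_comp_alt
  rw [PySem.List.foldl_append_singleton_eq_map, PySem.List.foldl_append_singleton_eq_map]
  simp only [List.nil_append]
  apply List.map_congr_left
  intro P _
  exact congrArg (Prod.mk P.2) (pv_inner P.2)
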